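-- pv_equiv track=rewrite | github.com/difeizheng/ai_middle_platform | backend/app/middleware/quota_check.py | _get_resource_type
-- ===== SOURCE A (Python) =====
-- from typing import Optional, Dict, List, Callable
--
-- QUOTA_CHECK_ENDPOINTS = {
--     "/api/v1/inference/chat/completions": "model_call",
--     "/api/v1/inference/embeddings": "model_call",
--     "/api/v1/inference/generate": "model_call",
--     "/api/v1/knowledge/search": "knowledge_base",
--     "/api/v1/agents/execute": "agent",
--     "/api/v1/skills/skills/": "skill",  # 前缀匹配
-- }
--
-- def _get_resource_type(path: str) -> Optional[str]:
--     """根据路径获取资源类型"""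
--     # 精确匹配
--     if path in QUOTA_CHECK_ENDPOINTS:
--         return QUOTA_CHECK_ENDPOINTS[path]
--
--     # 前缀匹配
--     for endpoint_prefix, resource_type in QUOTA_CHECK_ENDPOINTS.items():
--         if endpoint_prefix.endswith("/"):
--             # 前缀匹配
--             if path.startswith(endpoint_prefix):
--                 return resource_type
--
--     return None
-- ===== SOURCE B (Python) =====
-- from typing import Optional
--
-- QUOTA_CHECK_ENDPOINTS = {
--     "/api/v1/inference/chat/completions": "model_call",
--     "/api/v1/inference/embeddings": "model_call",
--     "/api/v1/inference/generate": "model_call",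
--     "/api/v1/knowledge/search": "knowledge_base",
--     "/api/v1/agents/execute": "agent",
--     "/api/v1/skills/skills/": "skill",  # 前缀匹配
-- }
--
-- def _get_resource_type(path: str) -> Optional[str]:
--     """根据路径获取资源类型 (longest-prefix routing over the path's own prefixes)"""
--     for i in range(len(path), 0, -1):
--         p = path[:i]
--         if (i == len(path) or p.endswith("/")) and p in QUOTA_CHECK_ENDPOINTS:
--             return QUOTA_CHECK_ENDPOINTS[p]
--     return None
-- ===== Notes on version B (the rewrite author's own statement) =====
-- stated objective: alternative
-- what changed: Instead of scanning the endpoint table (dict membership, then a prefix loop over the keys), B does longest-prefix routing over the path itself: it walks the path's prefixes from longest to shortest and probes the table once per prefix, returning on the first hit that is the whole path or ends with a slash.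
import Mathlib
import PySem

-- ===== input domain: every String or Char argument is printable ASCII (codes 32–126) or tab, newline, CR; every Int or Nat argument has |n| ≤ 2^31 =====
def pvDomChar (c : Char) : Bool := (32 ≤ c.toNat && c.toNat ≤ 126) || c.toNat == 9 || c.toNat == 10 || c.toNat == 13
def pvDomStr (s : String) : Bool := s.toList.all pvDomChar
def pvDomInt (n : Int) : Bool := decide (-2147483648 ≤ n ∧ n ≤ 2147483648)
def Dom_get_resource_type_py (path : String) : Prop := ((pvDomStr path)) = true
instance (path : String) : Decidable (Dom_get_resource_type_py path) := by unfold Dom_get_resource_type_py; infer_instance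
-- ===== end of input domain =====

-- B replaces A's table scan (dict membership, then a prefix loop over the keys) by
-- longest-prefix routing over the PATH's own prefixes (one dict probe per prefix); objective: alternative.

-- ===== PORT A =====
-- module constant QUOTA_CHECK_ENDPOINTS (shared table; A scans its items, B probes it)
def quotaCheckEndpoints : List (String × String) :=
  [("/api/v1/inference/chat/completions", "model_call"),
   ("/api/v1/inference/embeddings", "model_call"),
   ("/api/v1/inference/generate", "model_call"),
   ("/api/v1/knowledge/search", "knowledge_base"),
   ("/api/v1/agents/execute", "agent"),
   ("/api/v1/skills/skills/", "skill")]

def quotaDict : PySem.Dict String String := PySem.Dict.ofList quotaCheckEndpoints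

-- the 'for endpoint_prefix, resource_type in QUOTA_CHECK_ENDPOINTS.items():' loop with early return
def prefixLoopA (path : String) : List (String × String) → Option String
  | [] => none
  | (ep, rt) :: rest =>
      if PySem.Str.endswith ep "/" then
        if PySem.Str.startswith path ep then some rt else prefixLoopA path rest
      else prefixLoopA path rest

def get_resource_type_py (path : String) : Option String :=
  match PySem.Dict.get? quotaDict path with
  | some v => some v
  | none => prefixLoopA path quotaDict.items

-- ===== PORT B =====
-- 'for i in range(len(path), 0, -1): p = path[:i]; if (i == len(path) or p.endswith("/")) and p in dict: return dict[p]'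
def loopB (path : String) (n : Int) : List Int → Option String
  | [] => none
  | i :: rest =>
      let p := PySem.Str.slice path none (some i)
      if (i == n || PySem.Str.endswith p "/") && PySem.Dict.contains quotaDict p then
        PySem.Dict.get? quotaDict p          -- dict[p]; guarded by the membership test
      else loopB path n rest

def get_resource_type_py_alt (path : String) : Option String :=
  loopB path (PySem.Chars.len path.toList) (PySem.List.pyRange (PySem.Chars.len path.toList) 0 (-1))

-- ===== PRECONDITION & SPEC =====
def Spec_get_resource_type_py (path : String) (out : Option String) : Prop := out = get_resource_type_py_alt path
instance (path : String) (out : Option String) : Decidable (Spec_get_resource_type_py path out) := by unfold Spec_get_resource_type_py; infer_instance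

-- ===== CLAIM (what is proved, stated in full; the proofs are below) =====
def Claim_equal_get_resource_type_py : Prop := ∀ (path : String), Dom_get_resource_type_py path → Spec_get_resource_type_py path (get_resource_type_py path)

-- ===== LEMMAS AND PROOFS =====

-- evaluated facts about the concrete endpoint table
theorem quotaDict_eq : quotaDict = PySem.Dict.mk quotaCheckEndpoints := by decide

theorem items_eq : quotaDict.items = quotaCheckEndpoints := by rw [quotaDict_eq]

-- membership in the table means being one of the six keys
theorem contains_quota_iff (p : String) :
    PySem.Dict.contains quotaDict p = true ↔
      (p = "/api/v1/inference/chat/completions" ∨ p = "/api/v1/inference/embeddings" ∨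
       p = "/api/v1/inference/generate" ∨ p = "/api/v1/knowledge/search" ∨
       p = "/api/v1/agents/execute" ∨ p = "/api/v1/skills/skills/") := by
  rw [quotaDict_eq]
  simp only [quotaCheckEndpoints, PySem.Dict.contains_mk, List.any_cons, List.any_nil]
  constructor
  · intro h
    rcases (by simpa using h.symm :
        "/api/v1/inference/chat/completions" = p ∨ "/api/v1/inference/embeddings" = p ∨
        "/api/v1/inference/generate" = p ∨ "/api/v1/knowledge/search" = p ∨
        "/api/v1/agents/execute" = p ∨ "/api/v1/skills/skills/" = p) with
      h | h | h | h | h | h <;> simp [h.symm]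
  · rintro (h | h | h | h | h | h) <;> simp [h]

theorem slice_toList (path : String) (i : Int) (h0 : 0 ≤ i) :
    (PySem.Str.slice path none (some i)).toList = path.toList.take i.toNat := by
  simp [PySem.Str.toList_slice, PySem.List.slice_to _ h0]

theorem startswith_skills_iff (path : String) :
    PySem.Str.startswith path "/api/v1/skills/skills/" = true ↔
      ("/api/v1/skills/skills/" : String).toList <+: path.toList := by
  rw [← PySem.Chars.startswith_iff]
  simp [PySem.Str.startswith]

-- B's loop returns nothing when the path matches no key exactly and no prefix key
theorem loopB_none (path : String) (n : Int) (hn : n = (path.toList.length : Int))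
    (h1 : path ≠ "/api/v1/inference/chat/completions")
    (h2 : path ≠ "/api/v1/inference/embeddings")
    (h3 : path ≠ "/api/v1/inference/generate")
    (h4 : path ≠ "/api/v1/knowledge/search")
    (h5 : path ≠ "/api/v1/agents/execute")
    (hns : ¬ ("/api/v1/skills/skills/" : String).toList <+: path.toList) :
    ∀ L : List Int, (∀ i ∈ L, 0 < i ∧ i ≤ n) → loopB path n L = none := by
  intro L
  induction L with
  | nil => intro _; simp [loopB]
  | cons i rest ih =>
    intro hmem
    obtain ⟨hi0, hin⟩ := hmem i (List.mem_cons_self ..)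
    have hp : (PySem.Str.slice path none (some i)).toList = path.toList.take i.toNat :=
      slice_toList path i (le_of_lt hi0)
    have hcond : ((i == n || PySem.Str.endswith (PySem.Str.slice path none (some i)) "/")
        && PySem.Dict.contains quotaDict (PySem.Str.slice path none (some i))) = false := by
      by_cases hc : PySem.Dict.contains quotaDict (PySem.Str.slice path none (some i)) = true
      · -- the slice is one of the six keys
        rcases (contains_quota_iff _).mp hc with hk | hk | hk | hk | hk | hk
        all_goals (
          first
          | -- the prefix key: the slice being it would make path start with it
            (exfalso
             apply hns
             have : ("/api/v1/skills/skills/" : String).toList = path.toList.take i.toNat := by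
               rw [← hp, hk]
             rw [this]
             exact List.take_prefix _ _)
          | -- a non-prefix key: it does not end with '/', so only i == n could fire,
            -- but then the slice is all of path and path is not that key
            (rcases lt_or_eq_of_le hin with hlt | heq
             · have hb : (i == n) = false := beq_eq_false_iff_ne.mpr (ne_of_lt hlt)
               rw [hk, hb]
               decide
             · exfalso
               have hi : i.toNat = path.toList.length := by omega
               have : (PySem.Str.slice path none (some i)).toList = path.toList := by
                 rw [hp, hi, List.take_length]
               have hpe : PySem.Str.slice path none (some i) = path :=
                 String.toList_inj.mp this
               rw [hpe] at hk
               first | exact h1 hk | exact h2 hk | exact h3 hk | exact h4 hk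
                     | exact h5 hk))
      · simp [Bool.eq_false_iff.mpr hc]
    simp only [loopB, hcond, Bool.false_eq_true, if_false]
    exact ih (fun j hj => hmem j (List.mem_cons_of_mem _ hj))

-- B's loop, started at any index ≥ 22, finds the prefix key when path starts with it
theorem loopB_skill (path : String) (n : Int) (hn : n = (path.toList.length : Int))
    (hpre : path.toList.take 22 = ("/api/v1/skills/skills/" : String).toList) :
    ∀ k : Nat, 22 + (k : Int) ≤ n →
      loopB path n (PySem.List.pyRange (22 + (k : Int)) 0 (-1)) = some "skill" := by
  intro k
  induction k with
  | zero =>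
    intro _
    rw [PySem.List.pyRange_neg_one_cons (by omega : (0:Int) < 22 + ((0:Nat):Int))]
    have hpeq : PySem.Str.slice path none (some (22 + ((0:Nat):Int))) = "/api/v1/skills/skills/" := by
      apply String.toList_inj.mp
      rw [slice_toList path _ (by omega)]
      rw [show ((22 + ((0:Nat):Int)).toNat) = 22 from by omega]
      exact hpre
    simp only [loopB, hpeq]
    rw [show PySem.Str.endswith "/api/v1/skills/skills/" "/" = true from by decide]
    rw [show PySem.Dict.contains quotaDict "/api/v1/skills/skills/" = true from by decide]
    simp only [Bool.or_true, Bool.true_and, if_true]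
    decide
  | succ k ih =>
    intro hle
    set i : Int := 22 + ((k+1 : Nat) : Int) with hidef
    have hi0 : (0:Int) < i := by omega
    rw [PySem.List.pyRange_neg_one_cons hi0]
    have hp : (PySem.Str.slice path none (some i)).toList = path.toList.take i.toNat :=
      slice_toList path i (le_of_lt hi0)
    have hlen : (PySem.Str.slice path none (some i)).toList.length = i.toNat := by
      rw [hp, List.length_take]
      omega
    have htake22 : (PySem.Str.slice path none (some i)).toList.take 22 =
        ("/api/v1/skills/skills/" : String).toList := by
      rw [hp, List.take_take, show min 22 i.toNat = 22 by omega, hpre]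
    have hc : PySem.Dict.contains quotaDict (PySem.Str.slice path none (some i)) = false := by
      by_cases hc' : PySem.Dict.contains quotaDict (PySem.Str.slice path none (some i)) = true
      · exfalso
        rcases (contains_quota_iff _).mp hc' with hk | hk | hk | hk | hk | hk
        · rw [hk] at htake22; revert htake22; decide
        · rw [hk] at htake22; revert htake22; decide
        · rw [hk] at htake22; revert htake22; decide
        · rw [hk] at htake22; revert htake22; decide
        · rw [hk] at htake22; revert htake22; decide
        · -- the prefix key itself has length 22 < i
          rw [hk] at hlen
          have : (("/api/v1/skills/skills/" : String).toList).length = 22 := by decide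
          omega
      · exact Bool.eq_false_iff.mpr hc'
    simp only [loopB, hc, Bool.and_false, Bool.false_eq_true, if_false]
    have : i - 1 = 22 + (k : Int) := by omega
    rw [this]
    exact ih (by omega)

-- ===== VERDICT (by name: the statement is the Claim_ definition above) =====
theorem get_resource_type_py_spec : Claim_equal_get_resource_type_py := by
  intro path _
  unfold Spec_get_resource_type_py
  by_cases h1 : path = "/api/v1/inference/chat/completions"
  · subst h1; decide
  by_cases h2 : path = "/api/v1/inference/embeddings"
  · subst h2; decide
  by_cases h3 : path = "/api/v1/inference/generate"
  · subst h3; decide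
  by_cases h4 : path = "/api/v1/knowledge/search"
  · subst h4; decide
  by_cases h5 : path = "/api/v1/agents/execute"
  · subst h5; decide
  by_cases h6 : path = "/api/v1/skills/skills/"
  · subst h6; decide
  -- path is none of the keys: A's dict lookup misses
  have e1 : (("/api/v1/inference/chat/completions" : String) == path) = false :=
    beq_eq_false_iff_ne.mpr (Ne.symm h1)
  have e2 : (("/api/v1/inference/embeddings" : String) == path) = false :=
    beq_eq_false_iff_ne.mpr (Ne.symm h2)
  have e3 : (("/api/v1/inference/generate" : String) == path) = false :=
    beq_eq_false_iff_ne.mpr (Ne.symm h3)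
  have e4 : (("/api/v1/knowledge/search" : String) == path) = false :=
    beq_eq_false_iff_ne.mpr (Ne.symm h4)
  have e5 : (("/api/v1/agents/execute" : String) == path) = false :=
    beq_eq_false_iff_ne.mpr (Ne.symm h5)
  have e6 : (("/api/v1/skills/skills/" : String) == path) = false :=
    beq_eq_false_iff_ne.mpr (Ne.symm h6)
  have hget : PySem.Dict.get? quotaDict path = none := by
    rw [quotaDict_eq]
    simp [PySem.Dict.get?, quotaCheckEndpoints, e1, e2, e3, e4, e5, e6]
  have hn : PySem.Chars.len path.toList = (path.toList.length : Int) := by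
    simp [PySem.Chars.len]
  by_cases hs : PySem.Str.startswith path "/api/v1/skills/skills/" = true
  · -- prefix match: both return "skill"
    have hpref := (startswith_skills_iff path).mp hs
    have hlen22 : 22 ≤ path.toList.length := by
      have := hpref.length_le
      simpa using this
    have hpre : path.toList.take 22 = ("/api/v1/skills/skills/" : String).toList := by
      have := (List.prefix_iff_eq_take.mp hpref)
      simpa using this.symm
    have hA : get_resource_type_py path = some "skill" := by
      unfold get_resource_type_py
      rw [hget, items_eq]
      simp only [quotaCheckEndpoints, prefixLoopA]
      rw [show PySem.Str.endswith "/api/v1/inference/chat/completions" "/" = false from by decide]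
      rw [show PySem.Str.endswith "/api/v1/inference/embeddings" "/" = false from by decide]
      rw [show PySem.Str.endswith "/api/v1/inference/generate" "/" = false from by decide]
      rw [show PySem.Str.endswith "/api/v1/knowledge/search" "/" = false from by decide]
      rw [show PySem.Str.endswith "/api/v1/agents/execute" "/" = false from by decide]
      rw [show PySem.Str.endswith "/api/v1/skills/skills/" "/" = true from by decide]
      simp only [hs]
      rfl
    have hB : get_resource_type_py_alt path = some "skill" := by
      unfold get_resource_type_py_alt
      rw [hn]
      have hk : 22 + (((path.toList.length - 22 : Nat)) : Int) = (path.toList.length : Int) := by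
        omega
      have h := loopB_skill path (path.toList.length : Int) rfl hpre
        (path.toList.length - 22) (le_of_eq hk)
      rw [hk] at h
      exact h
    rw [hA, hB]
  · -- no match at all: both return none
    have hns : ¬ ("/api/v1/skills/skills/" : String).toList <+: path.toList := fun h =>
      hs ((startswith_skills_iff path).mpr h)
    have hA : get_resource_type_py path = none := by
      unfold get_resource_type_py
      rw [hget, items_eq]
      simp only [quotaCheckEndpoints, prefixLoopA]
      rw [show PySem.Str.endswith "/api/v1/inference/chat/completions" "/" = false from by decide]
      rw [show PySem.Str.endswith "/api/v1/inference/embeddings" "/" = false from by decide]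
      rw [show PySem.Str.endswith "/api/v1/inference/generate" "/" = false from by decide]
      rw [show PySem.Str.endswith "/api/v1/knowledge/search" "/" = false from by decide]
      rw [show PySem.Str.endswith "/api/v1/agents/execute" "/" = false from by decide]
      rw [show PySem.Str.endswith "/api/v1/skills/skills/" "/" = true from by decide]
      simp only [Bool.eq_false_iff.mpr hs]
      rfl
    have hB : get_resource_type_py_alt path = none := by
      unfold get_resource_type_py_alt
      rw [hn]
      refine loopB_none path _ rfl h1 h2 h3 h4 h5 hns _ ?_
      intro i hi
      have := PySem.List.mem_pyRange_neg_one.mp hi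
      omega
    rw [hA, hB]
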